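-- pv_equiv track=rewrite | github.com/tsouvarev/advent_of_code | 2015/19_medicine_for_rudolph/part_2.py | reduce_molecule
-- ===== SOURCE A (Python) =====
-- def reduce_molecule(
--     molecule: str,
--     replacements: list[tuple[str, str]],
--     history: list[str] | None = None,
-- ) -> list[list[str]]:
--     if history is None:
--         history = []
--     if molecule == "e":
--         return [history]
--
--     histories = []
--     for from_, to_ in replacements:
--         if to_ in molecule:
--             reduced_molecule = _build_new_molecule(molecule, from_, to_)
--             res = reduce_molecule(
--                 reduced_molecule,
--                 replacements,
--                 [*history, (to_, from_)],
--             )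
--             if res:
--                 histories.extend(res)
--
--     return histories
--
-- def _build_new_molecule(molecule, from_, to_) -> str:
--     pos = molecule.find(to_)
--     return molecule[:pos] + from_ + molecule[pos + len(to_) :]
-- ===== SOURCE B (Python) =====
-- def reduce_molecule(
--     molecule: str,
--     replacements: list[tuple[str, str]],
--     history: list[str] | None = None,
-- ) -> list[list[str]]:
--     # Explicit stack-based DFS instead of recursion; same pre-order output.
--     stack = [(molecule, [] if history is None else history)]
--     results = []
--     while stack:
--         mol, hist = stack.pop()
--         if mol == "e":
--             results.append(hist)
--             continue
--         for from_, to_ in reversed(replacements):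
--             if to_ in mol:
--                 pos = mol.find(to_)
--                 reduced = mol[:pos] + from_ + mol[pos + len(to_):]
--                 stack.append((reduced, [*hist, (to_, from_)]))
--     return results
-- ===== Notes on version B (the rewrite author's own statement) =====
-- stated objective: alternative
-- what changed: The recursive pre-order DFS is replaced by an iterative explicit-stack DFS (frames pushed in reverse replacement order so LIFO popping restores the original pre-order output), with _build_new_molecule inlined; this removes Python recursion and its depth limit.
-- outside the precondition, e.g. on reduce_molecule('ab', [('ba', 'ab')], None): A returns [], B returns []; on reduce_molecule('abc', [('ca', 'ab')], None): A returns [], B returns []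
import Mathlib
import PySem

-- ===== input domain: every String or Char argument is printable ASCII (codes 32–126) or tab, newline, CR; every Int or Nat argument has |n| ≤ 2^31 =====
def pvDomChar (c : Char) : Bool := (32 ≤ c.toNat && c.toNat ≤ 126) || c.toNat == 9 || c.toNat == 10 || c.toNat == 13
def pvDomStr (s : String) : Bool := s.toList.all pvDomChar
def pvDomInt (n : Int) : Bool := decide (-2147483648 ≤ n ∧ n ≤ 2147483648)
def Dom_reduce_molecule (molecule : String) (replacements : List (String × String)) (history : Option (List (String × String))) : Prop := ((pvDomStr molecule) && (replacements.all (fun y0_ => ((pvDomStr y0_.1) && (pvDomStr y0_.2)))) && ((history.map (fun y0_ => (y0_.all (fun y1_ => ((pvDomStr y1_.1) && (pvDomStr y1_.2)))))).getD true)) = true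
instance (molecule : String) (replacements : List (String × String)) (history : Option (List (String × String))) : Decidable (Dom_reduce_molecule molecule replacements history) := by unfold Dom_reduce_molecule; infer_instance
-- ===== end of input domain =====

-- B replaces A's recursive pre-order DFS by an iterative explicit-stack DFS (frames pushed in
-- reverse replacement order so LIFO popping restores the pre-order output); same cost, no recursion.

-- ===== PORT A =====
-- termination measure used only as the ports' fuel (the value is proved fuel-independent below):
-- pvM reps m = (sum over non-shrinking rules of the count of their to_-character) * pvK + |m|
def pvK (reps : List (String × String)) : Nat := (reps.map (fun p => p.1.toList.length)).sum + 1
def pvS (reps : List (String × String)) (m : List Char) : Nat :=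
  (reps.map (fun p => if p.1.toList.length < p.2.toList.length then 0 else m.count p.2.toList.headI)).sum
def pvM (reps : List (String × String)) (m : List Char) : Nat := pvS reps m * pvK reps + m.length

-- _build_new_molecule(molecule, from_, to_): pos = molecule.find(to_); slices + concat
def pvBuildNew (m f t : List Char) : List Char :=
  let pos := PySem.Chars.find m t
  PySem.Chars.slice m none (some pos) ++ f ++
    PySem.Chars.slice m (some (pos + (t.length : Int))) none

-- the recursive body of A; fuel only makes the recursion total in Lean (lemma pvReduceA_fuel
-- below proves the value independent of the fuel whenever Pre_'s termination criterion holds)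
def pvReduceA (reps : List (String × String)) : Nat → List Char → List (String × String) → List (List (String × String))
  | 0, _, _ => []
  | n + 1, m, h =>
    if m = ['e'] then [h]
    else
      reps.foldl (fun acc ft =>
        if PySem.Chars.isIn ft.2.toList m then
          let res := pvReduceA reps n (pvBuildNew m ft.1.toList ft.2.toList) (h ++ [(ft.2, ft.1)])
          if res.isEmpty then acc else acc ++ res
        else acc) []

def reduce_molecule (molecule : String) (replacements : List (String × String)) (history : Option (List (String × String))) : List (List (String × String)) :=
  pvReduceA replacements (pvM replacements molecule.toList + 1) molecule.toList (history.getD [])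

-- ===== PORT B =====
-- the while-loop of B over an explicit stack (head = top); fuel only makes the loop total in
-- Lean: under Pre_ the number of pops is bounded by (|reps|+1)^(pvM+1)
def pvReduceB (reps : List (String × String)) : Nat → List (List Char × List (String × String)) → List (List (String × String)) → List (List (String × String))
  | 0, _, res => res
  | n + 1, stack, res =>
    match stack with
    | [] => res
    | (m, h) :: rest =>
      if m = ['e'] then pvReduceB reps n rest (res ++ [h])
      else
        pvReduceB reps n
          (reps.reverse.foldl (fun st ft =>
            if PySem.Chars.isIn ft.2.toList m then
              let pos := PySem.Chars.find m ft.2.toList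
              (PySem.Chars.slice m none (some pos) ++ ft.1.toList ++
                 PySem.Chars.slice m (some (pos + (ft.2.toList.length : Int))) none,
               h ++ [(ft.2, ft.1)]) :: st
            else st) rest)
          res

def reduce_molecule_alt (molecule : String) (replacements : List (String × String)) (history : Option (List (String × String))) : List (List (String × String)) :=
  pvReduceB replacements ((replacements.length + 1) ^ (pvM replacements molecule.toList + 1))
    [(molecule.toList, history.getD [])] []

-- ===== PRECONDITION & SPEC =====
-- Pre_ excludes inputs on which A's recursion need not terminate (Python RecursionError). Exact
-- termination of such string rewriting is undecidable, so Pre_ uses a closed-form guarantee: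
-- either the molecule is already "e", or no to_ occurs in the molecule (A returns at once), or
-- every replacement is reducing — it strictly shrinks the molecule (len(from_) < len(to_)) or
-- consumes a single-character to_ that no rule's from_ ever reintroduces.  Being a sufficient
-- criterion it also leaves out some terminating inputs (see claim cites), on which B agrees with
-- A anyway.
def Pre_reduce_molecule (molecule : String) (replacements : List (String × String)) (history : Option (List (String × String))) : Prop :=
  molecule = "e" ∨
  (∀ p ∈ replacements, PySem.Chars.isIn p.2.toList molecule.toList = false) ∨
  (∀ p ∈ replacements, p.1.toList.length < p.2.toList.length ∨
    (p.2.toList.length = 1 ∧ ∀ q ∈ replacements, PySem.Chars.isIn p.2.toList q.1.toList = false))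
instance (molecule : String) (replacements : List (String × String)) (history : Option (List (String × String))) : Decidable (Pre_reduce_molecule molecule replacements history) := by unfold Pre_reduce_molecule; infer_instance

def pvWitness_reduce_molecule : String × (List (String × String)) × (Option (List (String × String))) :=
  ("abe", [("a", "ab"), ("e", "be")], none)

def Spec_reduce_molecule (molecule : String) (replacements : List (String × String)) (history : Option (List (String × String))) (out : List (List (String × String))) : Prop := out = reduce_molecule_alt molecule replacements history
instance (molecule : String) (replacements : List (String × String)) (history : Option (List (String × String))) (out : List (List (String × String))) : Decidable (Spec_reduce_molecule molecule replacements history out) := by unfold Spec_reduce_molecule; infer_instance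

-- ===== CLAIM (what is proved, stated in full; the proofs are below) =====
def Claim_equal_reduce_molecule : Prop := ∀ (molecule : String) (replacements : List (String × String)) (history : Option (List (String × String))), Dom_reduce_molecule molecule replacements history → Pre_reduce_molecule molecule replacements history → Spec_reduce_molecule molecule replacements history (reduce_molecule molecule replacements history)

-- ===== LEMMAS AND PROOFS =====

-- the termination criterion of Pre_'s third disjunct, as a named hypothesis
def pvGood (reps : List (String × String)) : Prop :=
  ∀ p ∈ reps, p.1.toList.length < p.2.toList.length ∨
    (p.2.toList.length = 1 ∧ ∀ q ∈ reps, PySem.Chars.isIn p.2.toList q.1.toList = false)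

-- the forward-order list of child frames of a non-"e" molecule
def pvChildren (reps : List (String × String)) (m : List Char) (h : List (String × String)) : List (List Char × List (String × String)) :=
  reps.flatMap (fun ft =>
    if PySem.Chars.isIn ft.2.toList m then
      [(pvBuildNew m ft.1.toList ft.2.toList, h ++ [(ft.2, ft.1)])]
    else [])

-- weight of a frame / total cost of a stack: an upper bound on the number of pops it causes
def pvW (reps : List (String × String)) (m : List Char) : Nat := (reps.length + 1) ^ (pvM reps m + 1)
def pvCost (reps : List (String × String)) (stack : List (List Char × List (String × String))) : Nat :=
  (stack.map (fun c => pvW reps c.1)).sum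

-- a one-character string occurs in s iff the character is a member of s
lemma pvIsIn_singleton (c : Char) (s : List Char) :
    PySem.Chars.isIn [c] s = true ↔ c ∈ s := by
  rw [PySem.Chars.isIn_iff_infix]
  constructor
  · intro hinf; exact hinf.subset (List.mem_singleton_self c)
  · intro hmem
    obtain ⟨pre, suf, rfl⟩ := List.append_of_mem hmem
    exact ⟨pre, suf, by rw [List.append_assoc, List.singleton_append]⟩

-- pointwise ≤ of the mapped terms gives ≤ of the sums
lemma pvSum_le {α : Type} (f g : α → Nat) :
    ∀ (l : List α), (∀ x ∈ l, f x ≤ g x) → (l.map f).sum ≤ (l.map g).sum := by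
  intro l
  induction l with
  | nil => intro _; simp
  | cons a l ih =>
    intro h
    simp only [List.map_cons, List.sum_cons]
    have ha := h a (List.mem_cons_self)
    have hl := ih (fun x hx => h x (List.mem_cons_of_mem _ hx))
    omega

-- pointwise ≤ plus one strictly smaller term gives a strictly smaller sum
lemma pvSum_succ_le {α : Type} (f g : α → Nat) :
    ∀ (l : List α), (∀ x ∈ l, f x ≤ g x) → ∀ x0 ∈ l, f x0 + 1 ≤ g x0 →
      (l.map f).sum + 1 ≤ (l.map g).sum := by
  intro l
  induction l with
  | nil => intro _ x0 hx0; cases hx0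
  | cons a l ih =>
    intro h x0 hx0 hs
    simp only [List.map_cons, List.sum_cons]
    rcases List.mem_cons.mp hx0 with rfl | hmem
    · have hl := pvSum_le f g l (fun x hx => h x (List.mem_cons_of_mem _ hx))
      omega
    · have ha := h a (List.mem_cons_self)
      have hl := ih (fun x hx => h x (List.mem_cons_of_mem _ hx)) x0 hmem hs
      omega

-- the occurrence decomposition: m = m.take pos ++ t ++ m.drop (pos + |t|), and
-- pvBuildNew replaces the middle part by f
lemma pvBuildNew_eq (m f t : List Char) (hin : PySem.Chars.isIn t m = true) :
    pvBuildNew m f t =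
      m.take (PySem.Chars.find m t).toNat ++ f ++ m.drop ((PySem.Chars.find m t).toNat + t.length) ∧
    m = m.take (PySem.Chars.find m t).toNat ++ t ++ m.drop ((PySem.Chars.find m t).toNat + t.length) := by
  have hinf : t <:+: m := (PySem.Chars.isIn_iff_infix t m).mp hin
  have hpos : 0 ≤ PySem.Chars.find m t := (PySem.Chars.find_nonneg_iff m t).mpr hinf
  constructor
  · unfold pvBuildNew
    simp only [PySem.Chars.slice_eq_listSlice]
    rw [PySem.List.slice_to m hpos,
        PySem.List.slice_from m (by omega : (0:Int) ≤ PySem.Chars.find m t + (t.length : Int))]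
    congr 2
    omega
  · have hpre := (PySem.Chars.find_spec hpos).1
    obtain ⟨r, hr⟩ := hpre
    have hdrop : m.drop ((PySem.Chars.find m t).toNat + t.length) = r := by
      rw [← List.drop_drop, ← hr]
      simp
    rw [hdrop]
    conv_lhs => rw [← List.take_append_drop (PySem.Chars.find m t).toNat m, ← hr]
    rw [List.append_assoc]

-- under pvGood, every applicable rewrite strictly decreases the measure pvM
lemma pvM_build_lt (reps : List (String × String)) (hg : pvGood reps)
    (ft : String × String) (hft : ft ∈ reps) (m : List Char)
    (hin : PySem.Chars.isIn ft.2.toList m = true) :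
    pvM reps (pvBuildNew m ft.1.toList ft.2.toList) < pvM reps m := by
  obtain ⟨hb, hm⟩ := pvBuildNew_eq m ft.1.toList ft.2.toList hin
  generalize hA : m.take (PySem.Chars.find m ft.2.toList).toNat = A at hb hm
  generalize hB : m.drop ((PySem.Chars.find m ft.2.toList).toNat + ft.2.toList.length) = B at hb hm
  clear hA hB
  have hlenNew : (pvBuildNew m ft.1.toList ft.2.toList).length
      = A.length + ft.1.toList.length + B.length := by
    rw [hb]; simp only [List.length_append]
  have hlenM : m.length = A.length + ft.2.toList.length + B.length := by
    conv_lhs => rw [hm]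
    simp only [List.length_append]
  -- each non-shrinking rule's character count in the new molecule is the old count minus its
  -- count in the removed to_ (its count in the inserted from_ is 0 by pvGood)
  have hterm : ∀ p ∈ reps, ¬ p.1.toList.length < p.2.toList.length →
      (pvBuildNew m ft.1.toList ft.2.toList).count p.2.toList.headI
        + ft.2.toList.count p.2.toList.headI = m.count p.2.toList.headI := by
    intro p hp hns
    rcases hg p hp with h1 | ⟨hlen1, hnof⟩
    · exact absurd h1 hns
    · have hcf : ft.1.toList.count p.2.toList.headI = 0 := by
        apply List.count_eq_zero.mpr
        have hq := hnof ft hft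
        obtain ⟨c, hc⟩ := List.length_eq_one_iff.mp hlen1
        rw [hc]
        simp only [List.headI]
        intro hmem
        rw [← pvIsIn_singleton c ft.1.toList] at hmem
        rw [hc] at hq
        rw [hq] at hmem
        cases hmem
      have h1 := congrArg (fun l => List.count p.2.toList.headI l) hm
      have h2 := congrArg (fun l => List.count p.2.toList.headI l) hb
      simp only [List.count_append] at h1 h2
      omega
  -- termwise, the new molecule's contribution to pvS is at most the old one's
  have hpt : ∀ p ∈ reps,
      (if p.1.toList.length < p.2.toList.length then 0
        else (pvBuildNew m ft.1.toList ft.2.toList).count p.2.toList.headI)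
      ≤ (if p.1.toList.length < p.2.toList.length then 0 else m.count p.2.toList.headI) := by
    intro p hp
    by_cases hps : p.1.toList.length < p.2.toList.length
    · rw [if_pos hps, if_pos hps]
    · rw [if_neg hps, if_neg hps]
      have := hterm p hp hps
      omega
  by_cases hshrink : ft.1.toList.length < ft.2.toList.length
  · -- shrinking rule: pvS does not increase, the length strictly drops
    have hS : pvS reps (pvBuildNew m ft.1.toList ft.2.toList) ≤ pvS reps m := pvSum_le _ _ reps hpt
    have h2 := Nat.mul_le_mul_right (pvK reps) hS
    unfold pvM
    generalize pvS reps (pvBuildNew m ft.1.toList ft.2.toList) * pvK reps = X at h2 ⊢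
    generalize pvS reps m * pvK reps = Y at h2 ⊢
    omega
  · -- marker rule: pvS strictly drops, the length grows by less than pvK
    rcases hg ft hft with h1 | ⟨hlen1, _⟩
    · exact absurd h1 hshrink
    have hsft : (if ft.1.toList.length < ft.2.toList.length then 0
          else (pvBuildNew m ft.1.toList ft.2.toList).count ft.2.toList.headI) + 1
        ≤ (if ft.1.toList.length < ft.2.toList.length then 0 else m.count ft.2.toList.headI) := by
      rw [if_neg hshrink, if_neg hshrink]
      have h1 := hterm ft hft hshrink
      obtain ⟨c, hc⟩ := List.length_eq_one_iff.mp hlen1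
      rw [hc] at h1
      simp at h1
      simp only [hc, List.headI]
      omega
    have hS1 : pvS reps (pvBuildNew m ft.1.toList ft.2.toList) + 1 ≤ pvS reps m :=
      pvSum_succ_le _ _ reps hpt ft hft hsft
    have hfK : ft.1.toList.length + 1 ≤ pvK reps := by
      unfold pvK
      have hmemf : ft.1.toList.length ∈ reps.map (fun p => p.1.toList.length) :=
        List.mem_map.mpr ⟨ft, hft, rfl⟩
      have := List.single_le_sum (fun x _ => Nat.zero_le x) _ hmemf
      omega
    have hmul : pvS reps (pvBuildNew m ft.1.toList ft.2.toList) * pvK reps + pvK reps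
        ≤ pvS reps m * pvK reps := by
      calc pvS reps (pvBuildNew m ft.1.toList ft.2.toList) * pvK reps + pvK reps
          = (pvS reps (pvBuildNew m ft.1.toList ft.2.toList) + 1) * pvK reps := by ring
        _ ≤ pvS reps m * pvK reps := Nat.mul_le_mul_right _ hS1
    unfold pvM
    generalize pvS reps (pvBuildNew m ft.1.toList ft.2.toList) * pvK reps = X at hmul ⊢
    generalize pvS reps m * pvK reps = Y at hmul ⊢
    omega

-- A's foldl-with-extend over reps is a flatMap
lemma pvReduceA_succ (reps : List (String × String)) (n : Nat) (m : List Char) (h : List (String × String)) :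
    pvReduceA reps (n + 1) m h =
      if m = ['e'] then [h]
      else reps.flatMap (fun ft =>
        if PySem.Chars.isIn ft.2.toList m then
          pvReduceA reps n (pvBuildNew m ft.1.toList ft.2.toList) (h ++ [(ft.2, ft.1)])
        else []) := by
  by_cases he : m = ['e']
  · simp [pvReduceA, he]
  · simp only [pvReduceA, if_neg he]
    refine Eq.trans (PySem.List.foldl_congr_mem reps _
      (fun acc ft => acc ++ if PySem.Chars.isIn ft.2.toList m then
        pvReduceA reps n (pvBuildNew m ft.1.toList ft.2.toList) (h ++ [(ft.2, ft.1)]) else [])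
      [] ?_) ?_
    · intro acc ft _
      by_cases hP : PySem.Chars.isIn ft.2.toList m = true
      · simp only [hP, if_true]
        by_cases hres : (pvReduceA reps n (pvBuildNew m ft.1.toList ft.2.toList) (h ++ [(ft.2, ft.1)])).isEmpty = true
        · rw [List.isEmpty_iff] at hres
          simp [hres]
        · simp [hres]
      · simp [hP]
    · rw [PySem.List.foldl_append_eq_flatMap]
      simp

-- under pvGood every to_ is non-empty, so nothing applies to the empty molecule
lemma pvReduceA_nil (reps : List (String × String)) (hg : pvGood reps)
    (h : List (String × String)) (n : Nat) :
    pvReduceA reps (n + 1) [] h = [] := by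
  rw [pvReduceA_succ, if_neg (by simp)]
  rw [List.flatMap_eq_nil_iff.mpr]
  intro ft hft
  have ht : ft.2.toList ≠ [] := by
    rcases hg ft hft with h1 | ⟨h1, _⟩
    · intro hnil; rw [hnil] at h1; simp at h1
    · intro hnil; rw [hnil] at h1; simp at h1
  rw [if_neg]
  simp only [PySem.Chars.isIn_iff_infix]
  intro hinf
  exact ht (List.eq_nil_of_infix_nil hinf)

-- any sufficient fuel computes the same value (under the termination criterion)
lemma pvReduceA_fuel (reps : List (String × String)) (hg : pvGood reps) :
    ∀ (k : Nat) (m : List Char) (h : List (String × String)) (n n' : Nat),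
      pvM reps m ≤ k → pvM reps m < n → pvM reps m < n' →
      pvReduceA reps n m h = pvReduceA reps n' m h := by
  intro k
  induction k with
  | zero =>
    intro m h n n' hk hn hn'
    obtain ⟨n0, rfl⟩ : ∃ n0, n = n0 + 1 := ⟨n - 1, by omega⟩
    obtain ⟨n0', rfl⟩ : ∃ n0', n' = n0' + 1 := ⟨n' - 1, by omega⟩
    have hm : m = [] := List.length_eq_zero_iff.mp (by unfold pvM at hk; omega)
    subst hm
    rw [pvReduceA_nil reps hg, pvReduceA_nil reps hg]
  | succ k ih =>
    intro m h n n' hk hn hn'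
    obtain ⟨n0, rfl⟩ : ∃ n0, n = n0 + 1 := ⟨n - 1, by omega⟩
    obtain ⟨n0', rfl⟩ : ∃ n0', n' = n0' + 1 := ⟨n' - 1, by omega⟩
    rw [pvReduceA_succ, pvReduceA_succ]
    by_cases he : m = ['e']
    · simp [he]
    · simp only [if_neg he]
      apply List.flatMap_congr
      intro ft hft
      by_cases hP : PySem.Chars.isIn ft.2.toList m = true
      · simp only [hP, if_true]
        have hchild := pvM_build_lt reps hg ft hft m hP
        exact ih _ _ n0 n0' (by omega) (by omega) (by omega)
      · simp [hP]

-- pushing frames in reverse replacement order prepends the forward-order children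
lemma pvPush_eq (reps : List (String × String)) (m : List Char) (h : List (String × String))
    (rest : List (List Char × List (String × String))) :
    reps.reverse.foldl (fun st ft =>
      if PySem.Chars.isIn ft.2.toList m then
        let pos := PySem.Chars.find m ft.2.toList
        (PySem.Chars.slice m none (some pos) ++ ft.1.toList ++
           PySem.Chars.slice m (some (pos + (ft.2.toList.length : Int))) none,
         h ++ [(ft.2, ft.1)]) :: st
      else st) rest = pvChildren reps m h ++ rest := by
  rw [List.foldl_reverse]
  induction reps with
  | nil => simp [pvChildren]
  | cons ft l ihl =>
    rw [List.foldr_cons, ihl]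
    by_cases hP : PySem.Chars.isIn ft.2.toList m = true
    · simp only [pvChildren, List.flatMap_cons, hP, if_true, pvBuildNew]
      simp
    · simp [pvChildren, hP]

-- every child frame is strictly lighter than its parent
lemma pvChildren_weight_le (reps : List (String × String)) (hg : pvGood reps)
    (m : List Char) (h : List (String × String)) :
    ∀ c ∈ pvChildren reps m h, pvW reps c.1 ≤ (reps.length + 1) ^ pvM reps m := by
  intro c hc
  obtain ⟨ft, hft, hc⟩ := List.mem_flatMap.mp hc
  by_cases hP : PySem.Chars.isIn ft.2.toList m = true
  · simp only [hP, if_true, List.mem_singleton] at hc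
    subst hc
    have := pvM_build_lt reps hg ft hft m hP
    exact Nat.pow_le_pow_right (by omega) (by simpa [pvW] using this)
  · simp [hP] at hc

lemma pvChildren_length_le (reps : List (String × String)) (m : List Char) (h : List (String × String)) :
    (pvChildren reps m h).length ≤ reps.length := by
  induction reps with
  | nil => simp [pvChildren]
  | cons ft l ihl =>
    simp only [pvChildren] at ihl ⊢
    rw [List.flatMap_cons, List.length_append, List.length_cons]
    have hsplit : (if PySem.Chars.isIn ft.2.toList m then
        [(pvBuildNew m ft.1.toList ft.2.toList, h ++ [(ft.2, ft.1)])] else []).length ≤ 1 := by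
      split <;> simp
    omega

lemma pvCost_children (reps : List (String × String)) (hg : pvGood reps)
    (m : List Char) (h : List (String × String)) :
    pvCost reps (pvChildren reps m h) + 1 ≤ pvW reps m := by
  have hb : ∀ x ∈ (pvChildren reps m h).map (fun c => pvW reps c.1),
      x ≤ (reps.length + 1) ^ pvM reps m := by
    intro x hx
    obtain ⟨c, hc, rfl⟩ := List.mem_map.mp hx
    exact pvChildren_weight_le reps hg m h c hc
  have hsum := List.sum_le_card_nsmul _ _ hb
  rw [smul_eq_mul, List.length_map] at hsum
  have hlen := pvChildren_length_le reps m h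
  have hX : 1 ≤ (reps.length + 1) ^ pvM reps m := Nat.one_le_pow _ _ (by omega)
  have h1 : pvCost reps (pvChildren reps m h) ≤ reps.length * ((reps.length + 1) ^ pvM reps m) := by
    unfold pvCost
    calc ((pvChildren reps m h).map (fun c => pvW reps c.1)).sum
        ≤ (pvChildren reps m h).length * ((reps.length + 1) ^ pvM reps m) := hsum
      _ ≤ reps.length * ((reps.length + 1) ^ pvM reps m) := Nat.mul_le_mul_right _ hlen
  have hW : pvW reps m = (reps.length + 1) ^ pvM reps m * (reps.length + 1) := by
    simp [pvW, pow_succ]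
  nlinarith [h1, hX]

-- the result of a non-"e" node is the concatenation of its children's results
lemma pvF_unfold (reps : List (String × String)) (hg : pvGood reps)
    (m : List Char) (h : List (String × String)) (he : m ≠ ['e']) :
    pvReduceA reps (pvM reps m + 1) m h =
      (pvChildren reps m h).flatMap (fun c => pvReduceA reps (pvM reps c.1 + 1) c.1 c.2) := by
  rw [pvReduceA_succ, if_neg he]
  unfold pvChildren
  rw [List.flatMap_assoc]
  apply List.flatMap_congr
  intro ft hft
  by_cases hP : PySem.Chars.isIn ft.2.toList m = true
  · simp only [hP, if_true, List.flatMap_cons, List.flatMap_nil, List.append_nil]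
    have hchild := pvM_build_lt reps hg ft hft m hP
    exact pvReduceA_fuel reps hg (pvM reps (pvBuildNew m ft.1.toList ft.2.toList)) _ _ _ _
      (by omega) (by omega) (by omega)
  · simp [hP]

-- the stack loop of B computes, in order, A's recursive result for every frame
lemma pvReduceB_eq (reps : List (String × String)) (hg : pvGood reps) :
    ∀ (fuel : Nat) (stack : List (List Char × List (String × String))) (res : List (List (String × String))),
      pvCost reps stack ≤ fuel →
      pvReduceB reps fuel stack res =
        res ++ stack.flatMap (fun c => pvReduceA reps (pvM reps c.1 + 1) c.1 c.2) := by
  intro fuel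
  induction fuel with
  | zero =>
    intro stack res hc
    match stack with
    | [] => simp [pvReduceB]
    | (m, h) :: rest =>
      exfalso
      have : 1 ≤ pvW reps m := Nat.one_le_pow _ _ (by omega)
      simp only [pvCost, List.map_cons, List.sum_cons] at hc
      omega
  | succ n ih =>
    intro stack res hc
    match stack with
    | [] => simp [pvReduceB]
    | (m, h) :: rest =>
      simp only [pvCost, List.map_cons, List.sum_cons] at hc
      by_cases he : m = ['e']
      · have h1 : 1 ≤ pvW reps m := Nat.one_le_pow _ _ (by omega)
        simp only [pvReduceB, if_pos he]
        rw [ih rest (res ++ [h]) (by simpa [pvCost] using (by omega : (rest.map (fun c => pvW reps c.1)).sum ≤ n))]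
        subst he
        simp [pvReduceA]
      · simp only [pvReduceB, if_neg he]
        rw [pvPush_eq reps m h rest]
        have hcost : pvCost reps (pvChildren reps m h ++ rest) ≤ n := by
          have := pvCost_children reps hg m h
          simp only [pvCost, List.map_append, List.sum_append] at *
          omega
        rw [ih _ res hcost]
        rw [List.flatMap_append, List.flatMap_cons]
        rw [pvF_unfold reps hg m h he]

-- an empty stack returns the accumulated results whatever fuel is left
lemma pvReduceB_nil (reps : List (String × String)) (k : Nat) (res : List (List (String × String))) :
    pvReduceB reps k [] res = res := by
  cases k <;> simp [pvReduceB]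

-- ===== VERDICT (by name: the statement is the Claim_ definition above) =====
theorem reduce_molecule_spec : Claim_equal_reduce_molecule := by
  intro molecule replacements history _ hpre
  unfold Spec_reduce_molecule reduce_molecule reduce_molecule_alt
  by_cases he : molecule = "e"
  · subst he
    have htl : ("e" : String).toList = ['e'] := by decide
    rw [htl]
    obtain ⟨k, hk⟩ : ∃ k, (replacements.length + 1) ^ (pvM replacements ['e'] + 1) = k + 1 :=
      ⟨(replacements.length + 1) ^ (pvM replacements ['e'] + 1) - 1,
        by have := Nat.one_le_pow (pvM replacements ['e'] + 1) (replacements.length + 1) (by omega); omega⟩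
    rw [hk]
    rw [pvReduceA_succ, if_pos rfl]
    simp [pvReduceB, pvReduceB_nil]
  rcases hpre with he' | hnone | hgood
  · exact absurd he' he
  · -- no to_ occurs in molecule: both sides are the empty list
    have hm : molecule.toList ≠ ['e'] := fun hl => he (by
      have : molecule = "e" := by
        have := congrArg String.ofList hl
        simpa using this
      exact this)
    obtain ⟨k, hk⟩ : ∃ k, (replacements.length + 1) ^ (pvM replacements molecule.toList + 1) = k + 1 :=
      ⟨(replacements.length + 1) ^ (pvM replacements molecule.toList + 1) - 1,
        by have := Nat.one_le_pow (pvM replacements molecule.toList + 1) (replacements.length + 1) (by omega); omega⟩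
    rw [hk]
    have hflat : pvReduceA replacements (pvM replacements molecule.toList + 1) molecule.toList (history.getD []) = [] := by
      rw [pvReduceA_succ, if_neg hm]
      rw [List.flatMap_eq_nil_iff.mpr]
      intro ft hft
      simp [hnone ft hft]
    have hchild : pvChildren replacements molecule.toList (history.getD []) = [] := by
      unfold pvChildren
      rw [List.flatMap_eq_nil_iff.mpr]
      intro ft hft
      simp [hnone ft hft]
    rw [hflat]
    simp only [pvReduceB, if_neg hm]
    rw [pvPush_eq replacements molecule.toList (history.getD []) [], hchild]
    simp [pvReduceB_nil]
  · -- Pre_'s termination criterion: the stack loop enumerates A's recursion tree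
    rw [pvReduceB_eq replacements hgood _ _ _ (by simp [pvCost, pvW])]
    simp
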